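-- pv_equiv track=rewrite | github.com/iliketurtles29/pilahunt | app.py | newline_every_seven_words
-- ===== SOURCE A (Python) =====
-- def newline_every_seven_words(value):
--     if not value:
--         return ''
--     words = value.split()
--     lines = []
--     for i in range(0, len(words), 7):
--         lines.append(' '.join(words[i:i+7]))
--     return '<br>'.join(lines)
-- ===== SOURCE B (Python) =====
-- def newline_every_seven_words(value):
--     parts = []
--     for i, w in enumerate(value.split()):
--         if i > 0:
--             parts.append('<br>' if i % 7 == 0 else ' ')
--         parts.append(w)
--     return ''.join(parts)
-- ===== Notes on version B (the rewrite author's own statement) =====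
-- stated objective: alternative
-- what changed: A slices the word list into groups of seven and joins the group strings with '<br>'; B makes one flat pass over the enumerated words, emitting a positional separator ('<br>' when i%7==0, else ' ') before each non-first word and concatenating once.
import Mathlib
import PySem

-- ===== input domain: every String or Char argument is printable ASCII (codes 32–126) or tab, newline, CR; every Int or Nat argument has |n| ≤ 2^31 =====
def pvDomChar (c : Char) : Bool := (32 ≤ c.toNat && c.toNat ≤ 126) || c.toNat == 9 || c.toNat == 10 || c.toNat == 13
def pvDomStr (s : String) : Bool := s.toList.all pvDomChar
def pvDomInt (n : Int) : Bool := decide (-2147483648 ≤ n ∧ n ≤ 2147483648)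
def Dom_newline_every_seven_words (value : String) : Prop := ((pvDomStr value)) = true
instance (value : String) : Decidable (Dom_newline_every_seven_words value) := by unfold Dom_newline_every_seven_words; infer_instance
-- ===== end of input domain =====

-- B replaces A's chunk-slicing loop (group words in sevens, join the groups) by a single flat
-- pass over the enumerated words that picks a positional separator; objective: alternative.

-- ===== PORT A =====
def newline_every_seven_words (value : String) : String :=
  if value == "" then ""
  else
    let words := PySem.Str.split₀ value
    let lines := (PySem.List.pyRange 0 (PySem.List.len words) 7).foldl
      (fun lines i =>
        lines ++ [PySem.Str.join " " (PySem.List.slice words (some i) (some (i + 7)))]) []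
    PySem.Str.join "<br>" lines

-- ===== PORT B =====
def newline_every_seven_words_alt (value : String) : String :=
  let parts := (PySem.List.enumerate (PySem.Str.split₀ value)).foldl
    (fun parts iw =>
      (if iw.1 > 0 then
        parts ++ [if PySem.Int.mod iw.1 7 == 0 then "<br>" else " "]
      else parts) ++ [iw.2]) []
  PySem.Str.join "" parts

-- ===== PRECONDITION & SPEC =====
def Spec_newline_every_seven_words (value : String) (out : String) : Prop := out = newline_every_seven_words_alt value
instance (value : String) (out : String) : Decidable (Spec_newline_every_seven_words value out) := by unfold Spec_newline_every_seven_words; infer_instance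

-- ===== CLAIM (what is proved, stated in full; the proofs are below) =====
def Claim_equal_newline_every_seven_words : Prop := ∀ (value : String), Dom_newline_every_seven_words value → Spec_newline_every_seven_words value (newline_every_seven_words value)

-- ===== LEMMAS AND PROOFS =====

-- chunks of seven, as a recursive function (proof-side view of A's slicing loop)
def chunks7 {α : Type} : List α → List (List α)
  | [] => []
  | x :: xs => ((x :: xs).take 7) :: chunks7 (xs.drop 6)
termination_by l => l.length
decreasing_by simp

lemma chunks7_nil {α : Type} : chunks7 ([] : List α) = [] := by
  rw [chunks7.eq_def]

lemma chunks7_cons {α : Type} (x : α) (xs : List α) :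
    chunks7 (x :: xs) = ((x :: xs).take 7) :: chunks7 (xs.drop 6) := by
  rw [chunks7.eq_def]

lemma chunks7_ne_nil {α : Type} (x : α) (xs : List α) : chunks7 (x :: xs) ≠ [] := by
  rw [chunks7.eq_def]; simp

lemma chunks7_map {α β : Type} (f : α → β) (ws : List α) :
    chunks7 (ws.map f) = (chunks7 ws).map (List.map f) := by
  induction ws using chunks7.induct with
  | case1 => simp [chunks7_nil]
  | case2 x xs ih =>
    rw [List.map_cons, chunks7_cons, chunks7_cons, ← List.map_drop, ih]
    congr 1
    rw [← List.map_cons, List.map_take]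

-- A's index list of slices is exactly chunks7
lemma range_map_take_drop {α : Type} (ws : List α) :
    (List.range ((ws.length + 6) / 7)).map (fun k => (ws.drop (7 * k)).take 7) = chunks7 ws := by
  induction ws using chunks7.induct with
  | case1 => simp [chunks7_nil]
  | case2 x xs ih =>
    rw [chunks7_cons]
    rw [List.length_drop] at ih
    have hK : ((x :: xs).length + 6) / 7 = (xs.length - 6 + 6) / 7 + 1 := by
      simp; omega
    rw [hK, List.range_succ_eq_map, List.map_cons, List.map_map]
    refine List.cons_eq_cons.mpr ⟨by norm_num, ?_⟩
    rw [← ih]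
    apply List.map_congr_left
    intro k _
    show ((x :: xs).drop (7 * Nat.succ k)).take 7 = ((xs.drop 6).drop (7 * k)).take 7
    rw [List.drop_drop]
    have : 7 * Nat.succ k = (7 * k + 6) + 1 := by omega
    rw [this, List.drop_succ_cons]
    congr 2
    omega

-- join with a separator, unfolded one element
lemma join_cons (sep p : List Char) (rest : List (List Char)) :
    PySem.Chars.join sep (p :: rest)
      = p ++ (if rest = [] then [] else sep ++ PySem.Chars.join sep rest) := by
  cases rest with
  | nil => simp [PySem.Chars.join_singleton]
  | cons q r => rw [PySem.Chars.join_cons_cons sep p q r]; simp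

lemma join_nil_flatten (ls : List (List Char)) : PySem.Chars.join [] ls = ls.flatten := by
  induction ls with
  | nil => exact PySem.Chars.join_nil []
  | cons p rest ih => rw [join_cons]; cases rest <;> simp_all

-- B's flat-pass element, on the character-list side
def pvSep (i : Int) : List (List Char) :=
  if i > 0 then [if PySem.Int.mod i 7 == 0 then "<br>".toList else " ".toList] else []

def pvH (iw : Int × List Char) : List Char := (pvSep iw.1).flatten ++ iw.2

-- words past the first of a block all get a space separator
lemma inner_flat (ct : List (List Char)) : ∀ (m j : Nat), 1 ≤ j → j + ct.length ≤ 7 →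
    (PySem.List.enumerate ct (7 * (m : Int) + (j : Int))).flatMap pvH
      = ct.flatMap (fun w => ' ' :: w) := by
  induction ct with
  | nil => simp
  | cons w ct ih =>
    intro m j h1 h7
    rw [PySem.List.enumerate_cons, List.flatMap_cons]
    have hmod : PySem.Int.mod (7 * (m : Int) + (j : Int)) 7 ≠ 0 := by
      rw [PySem.Int.mod_eq_emod_of_pos (show (0:Int) < 7 by omega)]
      simp at h7
      omega
    have hpos : (0 : Int) < 7 * (m : Int) + (j : Int) := by
      have : (1 : Int) ≤ (j : Int) := by exact_mod_cast h1
      positivity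
    have hh : pvH (7 * (m : Int) + (j : Int), w) = ' ' :: w := by
      simp only [pvH, pvSep, if_pos hpos]
      rw [if_neg (by simpa using hmod)]
      rfl
    rw [hh]
    have : 7 * (m : Int) + (j : Int) + 1 = 7 * (m : Int) + ((j + 1 : Nat) : Int) := by
      push_cast; ring
    rw [this, ih m (j + 1) (by omega) (by simp at h7 ⊢; omega)]
    simp

lemma join_sp_flat (c0 : List Char) (ct : List (List Char)) :
    c0 ++ ct.flatMap (fun w => ' ' :: w) = PySem.Chars.join " ".toList (c0 :: ct) := by
  induction ct generalizing c0 with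
  | nil => simp [PySem.Chars.join_singleton]
  | cons q r ih =>
    rw [PySem.Chars.join_cons_cons]
    simp only [List.flatMap_cons, ← ih q]
    have hsp : (" ".toList : List Char) = [' '] := by decide
    simp [hsp]

-- every later block of seven, starting at a positive multiple of seven
lemma block_flat (ws : List (List Char)) : ∀ (m : Nat), ws ≠ [] →
    (PySem.List.enumerate ws (7 * ((m : Int) + 1))).flatMap pvH
      = "<br>".toList
          ++ PySem.Chars.join "<br>".toList ((chunks7 ws).map (PySem.Chars.join " ".toList)) := by
  induction ws using chunks7.induct with
  | case1 => intro m h; exact absurd rfl h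
  | case2 x xs ih =>
    intro m _
    have hmod : PySem.Int.mod (7 * ((m : Int) + 1)) 7 = 0 := by
      rw [PySem.Int.mod_eq_emod_of_pos (show (0:Int) < 7 by omega)]; omega
    have hpos : (0 : Int) < 7 * ((m : Int) + 1) := by positivity
    have hsplit : (x :: xs) = (x :: xs.take 6) ++ xs.drop 6 := by simp
    conv_lhs => rw [hsplit]
    rw [PySem.List.enumerate_append, List.flatMap_append,
      PySem.List.enumerate_cons, List.flatMap_cons]
    have hh : pvH (7 * ((m : Int) + 1), x) = "<br>".toList ++ x := by
      simp only [pvH, pvSep, if_pos hpos, hmod]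
      rfl
    have hstep : 7 * ((m : Int) + 1) + 1 = 7 * ((m + 1 : Nat) : Int) + ((1 : Nat) : Int) := by
      push_cast; ring
    rw [hh, hstep, inner_flat (xs.take 6) (m + 1) 1 (by omega) (by simp; omega)]
    rw [chunks7_cons, List.map_cons, join_cons]
    have h7 : List.take 7 (x :: xs) = x :: List.take 6 xs := by
      rw [show (7 : Nat) = 6 + 1 from rfl, List.take_succ_cons]
    rw [h7, ← join_sp_flat]
    by_cases hr : xs.drop 6 = []
    · simp [hr, chunks7_nil]
    · obtain ⟨y, ys, hy⟩ := List.exists_cons_of_ne_nil hr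
      have hnil : ¬ (chunks7 (xs.drop 6)).map (PySem.Chars.join " ".toList) = [] := by
        rw [hy]; simpa using chunks7_ne_nil y ys
      have hlen : ((x :: xs.take 6) : List (List Char)).length = 7 := by
        have : 6 ≤ xs.length := by
          by_contra hc
          exact hr (List.drop_eq_nil_of_le (by omega))
        simp [this]
      have hstart : 7 * ((m : Int) + 1) + (((x :: xs.take 6) : List (List Char)).length : Int)
          = 7 * (((m + 1 : Nat) : Int) + 1) := by
        rw [hlen]; push_cast; ring
      rw [hstart, ih (m + 1) hr, if_neg hnil]
      simp

-- the whole words list: B's flat pass equals A's joined chunks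
lemma main_flat (ws : List (List Char)) :
    (PySem.List.enumerate ws 0).flatMap pvH
      = PySem.Chars.join "<br>".toList ((chunks7 ws).map (PySem.Chars.join " ".toList)) := by
  cases ws with
  | nil => simp [chunks7, PySem.Chars.join_nil]
  | cons x xs =>
    have hsplit : (x :: xs) = (x :: xs.take 6) ++ xs.drop 6 := by simp
    conv_lhs => rw [hsplit]
    rw [PySem.List.enumerate_append, List.flatMap_append,
      PySem.List.enumerate_cons, List.flatMap_cons]
    have hh : pvH (0, x) = x := by simp [pvH, pvSep]
    have hstep : (0 : Int) + 1 = 7 * ((0 : Nat) : Int) + ((1 : Nat) : Int) := by norm_num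
    rw [hh, hstep, inner_flat (xs.take 6) 0 1 (by omega) (by simp; omega)]
    rw [chunks7_cons, List.map_cons, join_cons]
    have h7 : List.take 7 (x :: xs) = x :: List.take 6 xs := by
      rw [show (7 : Nat) = 6 + 1 from rfl, List.take_succ_cons]
    rw [h7, ← join_sp_flat]
    by_cases hr : xs.drop 6 = []
    · simp [hr, chunks7_nil]
    · obtain ⟨y, ys, hy⟩ := List.exists_cons_of_ne_nil hr
      have hnil : ¬ (chunks7 (xs.drop 6)).map (PySem.Chars.join " ".toList) = [] := by
        rw [hy]; simpa using chunks7_ne_nil y ys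
      have hlen : ((x :: xs.take 6) : List (List Char)).length = 7 := by
        have : 6 ≤ xs.length := by
          by_contra hc
          exact hr (List.drop_eq_nil_of_le (by omega))
        simp [this]
      have hstart : ((0 : Int)) + (((x :: xs.take 6) : List (List Char)).length : Int)
          = 7 * (((0 : Nat) : Int) + 1) := by
        rw [hlen]; norm_num
      rw [hstart, block_flat (xs.drop 6) 0 hr, if_neg hnil]

-- B's foldl as a flatMap
lemma fold_B (l : List (Int × String)) (acc : List String) :
    l.foldl (fun parts iw =>
        (if iw.1 > 0 then
          parts ++ [if PySem.Int.mod iw.1 7 == 0 then "<br>" else " "]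
        else parts) ++ [iw.2]) acc
      = acc ++ l.flatMap (fun iw =>
          (if iw.1 > 0 then [if PySem.Int.mod iw.1 7 == 0 then "<br>" else " "] else [])
            ++ [iw.2]) := by
  induction l generalizing acc with
  | nil => simp
  | cons iw l ih => rw [List.foldl_cons, ih, List.flatMap_cons]; split_ifs <;> simp

-- B's flattened parts, moved to the character-list side
lemma B_chars (ws : List String) : ∀ (s : Int),
    (((PySem.List.enumerate ws s).flatMap (fun iw =>
        (if iw.1 > 0 then [if PySem.Int.mod iw.1 7 == 0 then "<br>" else " "] else [])
          ++ [iw.2])).map String.toList).flatten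
      = (PySem.List.enumerate (ws.map String.toList) s).flatMap pvH := by
  induction ws with
  | nil => simp
  | cons w ws ih =>
    intro s
    rw [List.map_cons, PySem.List.enumerate_cons, PySem.List.enumerate_cons,
      List.flatMap_cons, List.flatMap_cons, List.map_append, List.flatten_append, ih (s + 1)]
    congr 1
    simp only [pvH, pvSep]
    split_ifs <;> simp_all

-- ===== VERDICT (by name: the statement is the Claim_ definition above) =====
theorem newline_every_seven_words_spec : Claim_equal_newline_every_seven_words := by
  intro value _
  unfold Spec_newline_every_seven_words
  by_cases hv : value = ""
  · subst hv; decide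
  · simp only [newline_every_seven_words, newline_every_seven_words_alt,
      if_neg (show ¬(value == "") = true by simpa using hv)]
    set ws := PySem.Str.split₀ value with hws
    rw [← String.toList_inj]
    rw [fold_B _ []]
    rw [PySem.List.foldl_append_singleton_eq_map, List.nil_append, List.nil_append]
    -- A side: the pyRange of slice starts becomes chunks7
    have hA : (PySem.List.pyRange 0 (PySem.List.len ws) 7).map
        (fun i => PySem.Str.join " " (PySem.List.slice ws (some i) (some (i + 7))))
        = (chunks7 ws).map (PySem.Str.join " ") := by
      rw [show PySem.List.len ws = (ws.length : Int) from by simp [PySem.List.len_eq],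
        PySem.List.pyRange_of_pos 0 (ws.length : Int) (by omega), List.map_map]
      have hK : (if (0 : Int) < (ws.length : Int)
          then (((ws.length : Int) - 0 + 7 - 1) / 7).toNat else 0) = (ws.length + 6) / 7 := by
        split_ifs <;> omega
      rw [hK, ← range_map_take_drop ws, List.map_map]
      apply List.map_congr_left
      intro k _
      show PySem.Str.join " " (PySem.List.slice ws (some (0 + 7 * (k : Int)))
        (some (0 + 7 * (k : Int) + 7))) = _
      have h1 : (0 : Int) + 7 * (k : Int) = ((7 * k : Nat) : Int) := by push_cast; ring
      have h2 : (0 : Int) + 7 * (k : Int) + 7 = ((7 * k : Nat) : Int) + ((7 : Nat) : Int) := by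
        push_cast; ring
      rw [h2, h1, PySem.List.slice_natCast_add ws (7 * k) 7]
      simp
    rw [hA, PySem.Str.toList_join, PySem.Str.toList_join, List.map_map]
    have hmapA : (chunks7 ws).map (String.toList ∘ PySem.Str.join " ")
        = (chunks7 (ws.map String.toList)).map (PySem.Chars.join " ".toList) := by
      rw [chunks7_map, List.map_map]
      apply List.map_congr_left
      intro c _
      exact PySem.Str.toList_join " " c
    rw [hmapA, show ("" : String).toList = [] from rfl, join_nil_flatten, B_chars ws 0,
      main_flat]
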